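-- pv_equiv track=rewrite | github.com/gustavoconect/x1-manager | backend/utils.py | get_champion_id_by_name
-- ===== SOURCE A (Python) =====
-- MANUAL_MAPPING = {
--     "Wukong": "MonkeyKing",
--     "Kog'Maw": "KogMaw",
--     "Rek'Sai": "RekSai",
--     "Cho'Gath": "Chogath",
--     "Kai'Sa": "Kaisa",
--     "Kha'Zix": "Khazix",
--     "LeBlanc": "Leblanc",
--     "Vel'Koz": "Velkoz",
--     "Bel'Veth": "Belveth",
--     "Nunu & Willump": "Nunu",
--     "Renata Glasc": "Renata",
--     "Dr. Mundo": "DrMundo",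
--     "Jarvan IV": "JarvanIV",
--     "Master Yi": "MasterYi",
--     "Lee Sin": "LeeSin",
--     "Tahm Kench": "TahmKench",
--     "Aurelion Sol": "AurelionSol",
--     "Miss Fortune": "MissFortune",
--     "Twisted Fate": "TwistedFate",
--     "Xin Zhao": "XinZhao",
-- }
--
-- def get_champion_id_by_name(champion_name, champions_data):
--     """Find the Data Dragon ID (e.g., 'MonkeyKing') for a given name (e.g., 'Wukong')."""
--     if champion_name in MANUAL_MAPPING:
--         return MANUAL_MAPPING[champion_name]
--
--     if champion_name in champions_data:
--         return champion_name
--     for champ_id, data in champions_data.items():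
--         if data["name"] == champion_name:
--             return champ_id
--     for champ_id, data in champions_data.items():
--         if data["name"].lower() == champion_name.lower():
--             return champ_id
--     return champion_name
-- ===== SOURCE B (Python) =====
-- MANUAL_MAPPING = {
--     "Wukong": "MonkeyKing",
--     "Kog'Maw": "KogMaw",
--     "Rek'Sai": "RekSai",
--     "Cho'Gath": "Chogath",
--     "Kai'Sa": "Kaisa",
--     "Kha'Zix": "Khazix",
--     "LeBlanc": "Leblanc",
--     "Vel'Koz": "Velkoz",
--     "Bel'Veth": "Belveth",
--     "Nunu & Willump": "Nunu",
--     "Renata Glasc": "Renata",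
--     "Dr. Mundo": "DrMundo",
--     "Jarvan IV": "JarvanIV",
--     "Master Yi": "MasterYi",
--     "Lee Sin": "LeeSin",
--     "Tahm Kench": "TahmKench",
--     "Aurelion Sol": "AurelionSol",
--     "Miss Fortune": "MissFortune",
--     "Twisted Fate": "TwistedFate",
--     "Xin Zhao": "XinZhao",
-- }
--
-- def get_champion_id_by_name(champion_name, champions_data):
--     """Find the Data Dragon ID (e.g., 'MonkeyKing') for a given name (e.g., 'Wukong')."""
--     if champion_name in MANUAL_MAPPING:
--         return MANUAL_MAPPING[champion_name]
--     if champion_name in champions_data: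
--         return champion_name
--     fallback = None
--     target = champion_name.lower()
--     for champ_id, data in champions_data.items():
--         name = data["name"]
--         if name == champion_name:
--             return champ_id
--         if fallback is None and name.lower() == target:
--             fallback = champ_id
--     return fallback if fallback is not None else champion_name
-- ===== Notes on version B (the rewrite author's own statement) =====
-- stated objective: alternative
-- what changed: Replaced A's two sequential scans over champions_data (exact-name pass, then a second full case-insensitive pass) by a single pass that returns on an exact hit and remembers the first case-insensitive hit as a fallback.
import Mathlib
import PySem

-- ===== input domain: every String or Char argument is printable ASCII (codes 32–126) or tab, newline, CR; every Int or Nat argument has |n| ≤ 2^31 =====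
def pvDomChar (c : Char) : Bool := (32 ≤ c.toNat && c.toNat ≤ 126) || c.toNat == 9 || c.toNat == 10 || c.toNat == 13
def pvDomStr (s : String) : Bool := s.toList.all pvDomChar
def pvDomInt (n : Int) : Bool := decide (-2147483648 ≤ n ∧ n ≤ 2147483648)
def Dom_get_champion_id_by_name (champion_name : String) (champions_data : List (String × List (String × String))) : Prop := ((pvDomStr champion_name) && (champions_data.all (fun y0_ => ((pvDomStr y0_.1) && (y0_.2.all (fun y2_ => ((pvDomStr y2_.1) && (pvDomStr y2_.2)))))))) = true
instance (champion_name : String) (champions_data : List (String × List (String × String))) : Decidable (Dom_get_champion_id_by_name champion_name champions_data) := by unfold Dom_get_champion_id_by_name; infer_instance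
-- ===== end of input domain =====

-- B replaces A's two sequential scans over champions_data (exact-name pass, then
-- case-insensitive pass) by ONE pass that returns on an exact hit and remembers the
-- first case-insensitive hit as a fallback (objective: alternative single-pass decomposition).

-- ===== PORT A =====
def pvManualMapping : PySem.Dict String String := PySem.Dict.mk
  [("Wukong", "MonkeyKing"), ("Kog'Maw", "KogMaw"), ("Rek'Sai", "RekSai"),
   ("Cho'Gath", "Chogath"), ("Kai'Sa", "Kaisa"), ("Kha'Zix", "Khazix"),
   ("LeBlanc", "Leblanc"), ("Vel'Koz", "Velkoz"), ("Bel'Veth", "Belveth"),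
   ("Nunu & Willump", "Nunu"), ("Renata Glasc", "Renata"), ("Dr. Mundo", "DrMundo"),
   ("Jarvan IV", "JarvanIV"), ("Master Yi", "MasterYi"), ("Lee Sin", "LeeSin"),
   ("Tahm Kench", "TahmKench"), ("Aurelion Sol", "AurelionSol"),
   ("Miss Fortune", "MissFortune"), ("Twisted Fate", "TwistedFate"), ("Xin Zhao", "XinZhao")]

-- data["name"] (KeyError when absent is excluded by Pre_; default "" is never reached there)
def pvName (d : List (String × String)) : String := PySem.Dict.getD (PySem.Dict.mk d) "name" ""

-- A's first loop: first entry whose data["name"] == champion_name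
def pvLoopExact (champion_name : String) : List (String × List (String × String)) → Option String
  | [] => none
  | (cid, d) :: rest =>
      if pvName d == champion_name then some cid else pvLoopExact champion_name rest

-- A's second loop: first entry whose data["name"].lower() == champion_name.lower()
def pvLoopLower (champion_name : String) : List (String × List (String × String)) → Option String
  | [] => none
  | (cid, d) :: rest =>
      if PySem.Str.lower (pvName d) == PySem.Str.lower champion_name then some cid
      else pvLoopLower champion_name rest

def get_champion_id_by_name (champion_name : String) (champions_data : List (String × List (String × String))) : String :=
  match PySem.Dict.get? pvManualMapping champion_name with
  | some v => v
  | none =>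
    if champions_data.any (fun p => p.1 == champion_name) then champion_name
    else
      match pvLoopExact champion_name champions_data with
      | some cid => cid
      | none =>
        match pvLoopLower champion_name champions_data with
        | some cid => cid
        | none => champion_name

-- ===== PORT B =====
-- B's single loop: return on exact hit, remember the first case-insensitive hit
def pvScanB (champion_name target : String) (fallback : Option String) : List (String × List (String × String)) → String
  | [] => match fallback with
          | some f => f
          | none => champion_name
  | (cid, d) :: rest =>
      let name := pvName d
      if name == champion_name then cid
      else if fallback.isNone && (PySem.Str.lower name == target) then
        pvScanB champion_name target (some cid) rest
      else pvScanB champion_name target fallback rest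

def get_champion_id_by_name_alt (champion_name : String) (champions_data : List (String × List (String × String))) : String :=
  match PySem.Dict.get? pvManualMapping champion_name with
  | some v => v
  | none =>
    if champions_data.any (fun p => p.1 == champion_name) then champion_name
    else pvScanB champion_name (PySem.Str.lower champion_name) none champions_data

-- ===== PRECONDITION & SPEC =====
-- Pre_ excludes exactly the inputs where Python A raises KeyError (an entry without a
-- "name" key is reached before any exact-name match and before any early return):
-- A returns iff champion_name is in MANUAL_MAPPING, or is a key of champions_data, or
-- every entry lacking "name" is preceded by an entry whose "name" equals champion_name.
def Pre_get_champion_id_by_name (champion_name : String) (champions_data : List (String × List (String × String))) : Prop :=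
  (PySem.Dict.contains pvManualMapping champion_name = true) ∨
  (∃ p ∈ champions_data, p.1 = champion_name) ∨
  (∀ i : Fin champions_data.length,
     PySem.Dict.get? (PySem.Dict.mk (champions_data[i]).2) "name" = none →
     ∃ j : Fin champions_data.length, j.val < i.val ∧
       PySem.Dict.get? (PySem.Dict.mk (champions_data[j]).2) "name" = some champion_name)
instance (champion_name : String) (champions_data : List (String × List (String × String))) : Decidable (Pre_get_champion_id_by_name champion_name champions_data) := by unfold Pre_get_champion_id_by_name; infer_instance

def pvWitness_get_champion_id_by_name : String × (List (String × List (String × String))) :=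
  ("Ahri", [("Ahri", [("name", "Ahri")]), ("Zed", [("name", "Zed")])])

def Spec_get_champion_id_by_name (champion_name : String) (champions_data : List (String × List (String × String))) (out : String) : Prop := out = get_champion_id_by_name_alt champion_name champions_data
instance (champion_name : String) (champions_data : List (String × List (String × String))) (out : String) : Decidable (Spec_get_champion_id_by_name champion_name champions_data out) := by unfold Spec_get_champion_id_by_name; infer_instance

-- ===== CLAIM (what is proved, stated in full; the proofs are below) =====
def Claim_equal_get_champion_id_by_name : Prop := ∀ (champion_name : String) (champions_data : List (String × List (String × String))), Dom_get_champion_id_by_name champion_name champions_data → Pre_get_champion_id_by_name champion_name champions_data → Spec_get_champion_id_by_name champion_name champions_data (get_champion_id_by_name champion_name champions_data)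

-- ===== LEMMAS AND PROOFS =====

-- B's single pass equals A's two passes composed, for every fallback state.
theorem pvScanB_eq (champion_name : String)
    (l : List (String × List (String × String))) :
    ∀ fb : Option String,
    pvScanB champion_name (PySem.Str.lower champion_name) fb l =
      (match pvLoopExact champion_name l with
       | some cid => cid
       | none =>
         match fb with
         | some f => f
         | none =>
           match pvLoopLower champion_name l with
           | some cid => cid
           | none => champion_name) := by
  induction l with
  | nil => intro fb; cases fb <;> rfl
  | cons hd tl ih =>
    intro fb
    obtain ⟨cid, d⟩ := hd
    cases fb <;> by_cases hx : pvName d == champion_name <;>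
      by_cases hl : PySem.Str.lower (pvName d) == PySem.Str.lower champion_name <;>
      simp [pvScanB, pvLoopExact, pvLoopLower, hx, hl, ih]

-- ===== VERDICT (by name: the statement is the Claim_ definition above) =====
theorem get_champion_id_by_name_spec : Claim_equal_get_champion_id_by_name := by
  intro champion_name champions_data _ _
  unfold Spec_get_champion_id_by_name get_champion_id_by_name get_champion_id_by_name_alt
  cases PySem.Dict.get? pvManualMapping champion_name with
  | some v => rfl
  | none =>
    by_cases hk : champions_data.any (fun p => p.1 == champion_name)
    · simp [hk]
    · simp only [hk, Bool.not_eq_true] at *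
      rw [pvScanB_eq champion_name champions_data none]
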